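-- pv_equiv track=rewrite | github.com/ArcadiaFrame/PDF2Foundry | adventure_extractor.py | _format_index_html
-- ===== SOURCE A (Python) =====
-- from typing import Dict, List, Any, Optional, Tuple
--
-- def _format_index_html(entries: Dict[str, List[str]]) -> str:
--     """Format index entries as HTML
--
--     Args:
--         entries: Dictionary of index entries
--
--     Returns:
--         HTML formatted index
--     """
--     html = "<h1>Index</h1>\n"
--
--     # Group entries by first letter
--     by_letter = {}
--     for term, pages in entries.items():
--         first_letter = term[0].upper()
--         if first_letter not in by_letter:
--             by_letter[first_letter] = []
--         by_letter[first_letter].append((term, pages))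
--
--     # Sort letters
--     for letter in sorted(by_letter.keys()):
--         html += f"<h2>{letter}</h2>\n<ul>\n"
--
--         # Sort terms within each letter
--         for term, pages in sorted(by_letter[letter]):
--             html += f"<li><strong>{term}</strong>: {pages}</li>\n"
--
--         html += "</ul>\n"
--
--     return html
-- ===== SOURCE B (Python) =====
-- def _format_index_html(entries):
--     """Format index entries as HTML (single sort + one linear pass)."""
--     parts = ["<h1>Index</h1>\n"]
--     current = None
--     for term, pages in sorted(entries.items(), key=lambda it: it[0][0].upper() + it[0]):
--         letter = term[0].upper()
--         if letter != current:
--             if current is not None: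
--                 parts.append("</ul>\n")
--             parts.append(f"<h2>{letter}</h2>\n<ul>\n")
--             current = letter
--         parts.append(f"<li><strong>{term}</strong>: {pages}</li>\n")
--     if current is not None:
--         parts.append("</ul>\n")
--     return "".join(parts)
-- ===== Notes on version B (the rewrite author's own statement) =====
-- stated objective: simpler
-- what changed: Replaced the grouping dict plus two nested sorted loops by a single sort of the items under the key (uppercased first letter + term) followed by one linear pass that emits a letter header whenever the letter changes.
import Mathlib
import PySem

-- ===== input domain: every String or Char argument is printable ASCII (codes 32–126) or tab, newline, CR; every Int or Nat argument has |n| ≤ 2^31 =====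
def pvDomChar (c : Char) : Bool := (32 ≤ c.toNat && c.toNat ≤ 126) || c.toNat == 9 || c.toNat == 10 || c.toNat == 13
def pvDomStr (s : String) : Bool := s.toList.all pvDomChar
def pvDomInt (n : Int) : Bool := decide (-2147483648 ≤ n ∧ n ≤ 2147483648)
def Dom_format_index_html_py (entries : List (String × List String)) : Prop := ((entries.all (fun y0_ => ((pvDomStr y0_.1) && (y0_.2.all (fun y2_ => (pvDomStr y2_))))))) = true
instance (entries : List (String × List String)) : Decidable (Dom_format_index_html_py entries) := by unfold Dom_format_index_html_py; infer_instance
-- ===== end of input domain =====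

-- B replaces A's dict-grouping plus two nested sorted loops by ONE sort of the items
-- under the key (first letter uppercased) + term, followed by a single linear pass
-- that emits a letter header whenever the letter changes (objective: simpler, one pass).

-- shared formatting helpers: both Pythons build the very same f-string fragments
-- (pvReprStr/pvReprPages port CPython's repr() of a str / list of str by hand,
--  exact on the printable-ASCII + tab/newline/CR domain: escapes \\, \t, \n, \r
--  and the chosen quote, which is '"' iff the string contains ' and not ")
def pvReprCharQ (q c : Char) : List Char :=
  if c = '\\' then ['\\', '\\']
  else if c = '\t' then ['\\', 't']
  else if c = '\n' then ['\\', 'n']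
  else if c = '\r' then ['\\', 'r']
  else if c = q then ['\\', q]
  else [c]

def pvReprStr (s : String) : List Char :=
  let cs := s.toList
  let q : Char := if cs.contains '\'' && !cs.contains '"' then '"' else '\''
  q :: cs.flatMap (pvReprCharQ q) ++ [q]

def pvReprPages (ps : List String) : List Char :=
  '[' :: (PySem.Chars.join (", ".toList) (ps.map pvReprStr) ++ [']'])

-- term[0].upper(); the headD default is only reachable outside Pre_ (zero-length term, where Python raises IndexError)
def pvLetter (t : String) : Char := PySem.Chars.upperChar (t.toList.headD 'A')

def pvHeader : List Char := "<h1>Index</h1>\n".toList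
def pvH2 (L : Char) : List Char := "<h2>".toList ++ [L] ++ "</h2>\n<ul>\n".toList
def pvLi (p : String × List String) : List Char :=
  "<li><strong>".toList ++ p.1.toList ++ "</strong>: ".toList ++ pvReprPages p.2 ++ "</li>\n".toList
def pvCloseUl : List Char := "</ul>\n".toList

-- ===== PORT A =====
def format_index_html_py (entries : List (String × List String)) : String :=
  let items := (PySem.Dict.ofList entries).items
  let byLetter : PySem.Dict Char (List (String × List String)) :=
    items.foldl (fun d p => d.modify (pvLetter p.1) [] (fun v => v ++ [p])) PySem.Dict.empty
  let html :=
    (PySem.List.sorted byLetter.keys (fun L => L)).foldl (fun h L =>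
      let h := h ++ pvH2 L
      let h := (PySem.List.sorted2 (byLetter.getD L []) (fun p => p.1) (fun p => p.2)).foldl
                 (fun h p => h ++ pvLi p) h
      h ++ pvCloseUl) pvHeader
  String.ofList html

-- ===== PORT B =====
def pvStepB (st : List (List Char) × Option Char) (p : String × List String) :
    List (List Char) × Option Char :=
  let L := pvLetter p.1
  let st' := if st.2 ≠ some L then
      (st.1 ++ (if st.2.isSome then [pvCloseUl] else []) ++ [pvH2 L], some L)
    else st
  (st'.1 ++ [pvLi p], st'.2)

def format_index_html_py_alt (entries : List (String × List String)) : String :=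
  let srt := PySem.List.sorted (PySem.Dict.ofList entries).items (fun p => pvLetter p.1 :: p.1.toList)
  let st := srt.foldl pvStepB ([pvHeader], none)
  let parts := if st.2.isSome then st.1 ++ [pvCloseUl] else st.1
  String.ofList (PySem.Chars.join [] parts)

-- ===== PRECONDITION & SPEC =====
-- Pre_ excludes entries containing a zero-length term: there term[0] raises IndexError in both A and B.
def Pre_format_index_html_py (entries : List (String × List String)) : Prop :=
  ∀ p ∈ entries, p.1 ≠ ""
instance (entries : List (String × List String)) : Decidable (Pre_format_index_html_py entries) := by
  unfold Pre_format_index_html_py; infer_instance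

def pvWitness_format_index_html_py : (List (String × List String)) :=
  [("apple", ["1", "2"]), ("Bee", []), ("ant", ["3"])]

def Spec_format_index_html_py (entries : List (String × List String)) (out : String) : Prop := out = format_index_html_py_alt entries
instance (entries : List (String × List String)) (out : String) : Decidable (Spec_format_index_html_py entries out) := by unfold Spec_format_index_html_py; infer_instance

-- ===== CLAIM (what is proved, stated in full; the proofs are below) =====
def Claim_equal_format_index_html_py : Prop := ∀ (entries : List (String × List String)), Dom_format_index_html_py entries → Pre_format_index_html_py entries → Spec_format_index_html_py entries (format_index_html_py entries)


-- ===== LEMMAS AND PROOFS =====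

-- insertion sort only looks at `before` on elements of the list
theorem pv_insertBy_congr {α : Type} (before before' : α → α → Bool) (x : α) (acc : List α)
    (h : ∀ y ∈ acc, before x y = before' x y) :
    PySem.List.insertBy before x acc = PySem.List.insertBy before' x acc := by
  induction acc with
  | nil => rfl
  | cons y ys ih =>
    simp only [PySem.List.insertBy]
    rw [h y (List.mem_cons_self)]
    split
    · rfl
    · rw [ih (fun z hz => h z (List.mem_cons_of_mem _ hz))]

theorem pv_foldl_insertBy_congr {α : Type} (before before' : α → α → Bool) (xs acc : List α)
    (S : List α)
    (hacc : ∀ y ∈ acc, y ∈ S) (hxs : ∀ y ∈ xs, y ∈ S)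
    (h : ∀ a ∈ S, ∀ b ∈ S, before a b = before' a b) :
    xs.foldl (fun acc x => PySem.List.insertBy before x acc) acc
      = xs.foldl (fun acc x => PySem.List.insertBy before' x acc) acc := by
  induction xs generalizing acc with
  | nil => rfl
  | cons x xs ih =>
    simp only [List.foldl_cons]
    have hx : x ∈ S := hxs x List.mem_cons_self
    rw [pv_insertBy_congr before before' x acc (fun y hy => h x hx y (hacc y hy))]
    exact ih _ (fun y hy => by
        rcases (PySem.List.mem_insertBy before' x y acc).mp hy with h1 | h1
        · exact h1 ▸ hx
        · exact hacc y h1)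
      (fun y hy => hxs y (List.mem_cons_of_mem _ hy))

-- Python's tuple sort collapses to a sort on the first component when that is injective on the list
theorem pv_sorted2_eq_sorted {α κ₁ κ₂ : Type} [LinearOrder κ₁] [LT κ₂] [DecidableLT κ₂]
    (xs : List α) (k1 : α → κ₁) (k2 : α → κ₂)
    (hirr : ∀ c : κ₂, ¬ c < c)
    (hinj : ∀ a ∈ xs, ∀ b ∈ xs, k1 a = k1 b → a = b) :
    PySem.List.sorted2 xs k1 k2 = PySem.List.sorted xs k1 := by
  unfold PySem.List.sorted2 PySem.List.sorted
  simp only [if_neg (Bool.false_ne_true)]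
  apply pv_foldl_insertBy_congr _ _ xs [] xs (by simp) (fun y hy => hy)
  intro a ha b hb
  by_cases hlt : k1 a < k1 b
  · simp [hlt]
  · by_cases hgt : k1 b < k1 a
    · simp [hlt, hgt]
    · have heq : k1 a = k1 b := le_antisymm (not_lt.mp hgt) (not_lt.mp hlt)
      have hab : a = b := hinj a ha b hb heq
      subst hab
      simp [hirr]

-- `sorted` does not depend on which (propositionally equal) LT/Decidable instances were inferred
theorem pv_sorted_congrLT {α κ : Type} [i1 : LT κ] [d1 : DecidableLT κ] [i2 : LT κ] [d2 : DecidableLT κ]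
    (hpt : ∀ a b : κ, (@LT.lt _ i1 a b) ↔ (@LT.lt _ i2 a b)) (xs : List α) (key : α → κ) :
    @PySem.List.sorted α κ i1 d1 xs key false = @PySem.List.sorted α κ i2 d2 xs key false := by
  unfold PySem.List.sorted
  have h : (fun (a b : α) => @decide _ (d1 (key a) (key b)))
      = (fun (a b : α) => @decide _ (d2 (key a) (key b))) := by
    funext a b
    exact decide_eq_decide.mpr (hpt _ _)
  simp only [if_neg (Bool.false_ne_true)]
  rw [h]

-- concatenating the per-letter groups of a list gives back a permutation of the list
theorem pv_flatMap_filter_perm {α κ : Type} [BEq κ] [LawfulBEq κ] (f : α → κ) (Ls : List κ) (xs : List α)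
    (hnd : Ls.Nodup) (hcov : ∀ x ∈ xs, f x ∈ Ls) :
    (Ls.flatMap (fun L => xs.filter (fun x => f x == L))).Perm xs := by
  induction Ls generalizing xs with
  | nil =>
    have hx : xs = [] := by
      cases xs with
      | nil => rfl
      | cons a as => exact absurd (hcov a List.mem_cons_self) (List.not_mem_nil)
    simp [hx]
  | cons L Ls ih =>
    simp only [List.flatMap_cons]
    have hrest : ∀ L' ∈ Ls, xs.filter (fun x => f x == L')
        = (xs.filter (fun x => !(f x == L))).filter (fun x => f x == L') := by
      intro L' hL'
      rw [List.filter_filter]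
      apply List.filter_congr
      intro x _
      by_cases h : f x = L'
      · simp [h]
        exact fun hc => (List.nodup_cons.mp hnd).1 (hc ▸ hL')
      · simp [h]
    rw [List.flatMap_congr hrest]
    have hperm := ih (xs.filter (fun x => !(f x == L))) (List.nodup_cons.mp hnd).2
      (by
        intro x hx
        have hm := List.of_mem_filter hx
        have hc := hcov x (List.mem_of_mem_filter hx)
        simp at hm
        rcases List.mem_cons.mp hc with hc | hc
        · exact absurd hc hm
        · exact hc)
    exact (List.Perm.append_left _ hperm).trans (List.filter_append_perm _ xs)

theorem pv_flatMap_perm_congr {α κ : Type} (Ls : List κ) (g g' : κ → List α)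
    (h : ∀ L ∈ Ls, (g L).Perm (g' L)) : (Ls.flatMap g).Perm (Ls.flatMap g') := by
  induction Ls with
  | nil => simp
  | cons L Ls ih =>
    simp only [List.flatMap_cons]
    exact (h L List.mem_cons_self).append (ih (fun L' hL' => h L' (List.mem_cons_of_mem _ hL')))

-- B's linear pass, on a run of items sharing the current letter: it only emits <li>s
theorem pv_run_same (g : List (String × List String)) (L : Char)
    (hg : ∀ p ∈ g, pvLetter p.1 = L) (pieces : List (List Char)) :
    g.foldl pvStepB (pieces, some L) = (pieces ++ g.map pvLi, some L) := by
  induction g generalizing pieces with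
  | nil => simp
  | cons p g ih =>
    have hp := hg p List.mem_cons_self
    simp only [List.foldl_cons, pvStepB, hp]
    simp only [ne_eq, not_true_eq_false, reduceIte]
    rw [ih (fun q hq => hg q (List.mem_cons_of_mem _ hq))]
    simp

-- B's linear pass over one whole letter block, entered with a different current letter
theorem pv_run_block (g : List (String × List String)) (L : Char)
    (hg : ∀ p ∈ g, pvLetter p.1 = L) (hne : g ≠ [])
    (cur : Option Char) (hcur : cur ≠ some L) (pieces : List (List Char)) :
    g.foldl pvStepB (pieces, cur)
      = (pieces ++ (if cur.isSome then [pvCloseUl] else []) ++ [pvH2 L] ++ g.map pvLi, some L) := by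
  cases g with
  | nil => exact absurd rfl hne
  | cons p g =>
    have hp := hg p List.mem_cons_self
    simp only [List.foldl_cons, pvStepB, hp, ne_eq, hcur, not_false_iff, if_pos]
    rw [pv_run_same g L (fun q hq => hg q (List.mem_cons_of_mem _ hq))]
    simp

-- B's linear pass over a concatenation of letter blocks with strictly increasing letters
theorem pv_run_blocks (Ls : List Char) (g : Char → List (String × List String))
    (hg : ∀ L ∈ Ls, ∀ p ∈ g L, pvLetter p.1 = L) (hne : ∀ L ∈ Ls, g L ≠ [])
    (c : Char) (hlt : ∀ L ∈ Ls, c < L) (hpw : Ls.Pairwise (· < ·)) (pieces : List (List Char)) :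
    (Ls.flatMap g).foldl pvStepB (pieces, some c)
      = (pieces ++ Ls.flatMap (fun L => pvCloseUl :: pvH2 L :: (g L).map pvLi), some (Ls.getLastD c)) := by
  induction Ls generalizing c pieces with
  | nil => simp
  | cons L Ls ih =>
    simp only [List.flatMap_cons, List.foldl_append]
    rw [pv_run_block (g L) L (hg L List.mem_cons_self) (hne L List.mem_cons_self) (some c)
        (by simp; exact fun h => absurd (h ▸ hlt L List.mem_cons_self) (lt_irrefl L)) pieces]
    simp only [Option.isSome_some, if_pos]
    rw [ih (fun L' h => hg L' (List.mem_cons_of_mem _ h)) (fun L' h => hne L' (List.mem_cons_of_mem _ h)) L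
        (fun L' h => (List.pairwise_cons.mp hpw).1 L' h) (List.pairwise_cons.mp hpw).2]
    cases Ls with
    | nil => simp
    | cons a as =>
      cases h : (a :: as).getLast? with
      | none => simp at h
      | some x => simp [h]

-- A's nested folds, written as a flatMap of per-letter blocks
theorem pv_foldA (Ls : List Char) (g : Char → List (String × List String)) (acc : List Char) :
    Ls.foldl (fun h L =>
        (((g L).foldl (fun h p => h ++ pvLi p) (h ++ pvH2 L)) ++ pvCloseUl)) acc
      = acc ++ Ls.flatMap (fun L => pvH2 L ++ (g L).flatMap pvLi ++ pvCloseUl) := by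
  induction Ls generalizing acc with
  | nil => simp
  | cons L Ls ih =>
    simp only [List.foldl_cons, List.flatMap_cons]
    rw [PySem.List.foldl_append_eq_flatMap, ih]
    simp

theorem pv_join_nil_eq_flatten (ps : List (List Char)) :
    PySem.Chars.join [] ps = ps.flatten := by
  induction ps with
  | nil => simp [PySem.Chars.join_nil]
  | cons x ps ih =>
    cases ps with
    | nil => simp [PySem.Chars.join_singleton]
    | cons y qs => rw [PySem.Chars.join_cons_cons, ih]; simp

-- moving the closing </ul> from after each block to before the next block
theorem pv_close_shuffle (Ls : List Char) (g : Char → List (String × List String)) :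
    (Ls.flatMap (fun L => pvCloseUl :: pvH2 L :: (g L).map pvLi)).flatten ++ pvCloseUl
      = Ls.flatMap (fun L => pvCloseUl ++ (pvH2 L ++ (g L).flatMap pvLi)) ++ pvCloseUl := by
  induction Ls with
  | nil => simp
  | cons L Ls ih =>
    simp only [List.flatMap_cons, List.flatten_append, List.flatten_cons]
    rw [List.append_assoc, List.append_assoc, ih]
    simp [List.flatMap_def]

theorem pv_shift (Ls : List Char) (b : Char → List Char) (c : List Char) :
    Ls.flatMap (fun L => c ++ b L) ++ c = c ++ Ls.flatMap (fun L => b L ++ c) := by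
  induction Ls with
  | nil => simp
  | cons L Ls ih =>
    simp only [List.flatMap_cons, List.append_assoc] at *
    rw [ih]

-- the heart of the equivalence: A's value equals B's value on every input
theorem pv_main (entries : List (String × List String)) :
    format_index_html_py entries = format_index_html_py_alt entries := by
  unfold format_index_html_py format_index_html_py_alt
  set items := (PySem.Dict.ofList entries).items with hitems
  have hnodup : (items.map (fun p => p.1)).Nodup := by
    have h := PySem.Dict.nodup_keys_ofList (κ := String) (ν := List String) entries
    simpa [PySem.Dict.keys] using h
  -- the grouping dict
  have hgrp : ∀ L : Char,
      (items.foldl (fun d p => d.modify (pvLetter p.1) [] (fun v => v ++ [p])) PySem.Dict.empty).getD L []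
        = items.filter (fun p => pvLetter p.1 == L) := by
    intro L
    have h1 : items.foldl (fun d p => d.modify (pvLetter p.1) [] (fun v => v ++ [p])) PySem.Dict.empty
        = (items.map (fun p => (pvLetter p.1, p))).foldl
            (fun d q => d.modify q.1 [] (fun v => v ++ [q.2])) PySem.Dict.empty := by
      rw [List.foldl_map]
    rw [h1, PySem.Dict.getD_foldl_modify_append]
    simp [List.filter_map, Function.comp_def]
  have hkeys :
      (items.foldl (fun d p => d.modify (pvLetter p.1) [] (fun v => v ++ [p])) PySem.Dict.empty).keys
        = PySem.Set.ofList (items.map (fun p => pvLetter p.1)) := by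
    rw [PySem.Dict.keys_foldl_modify_key items (fun p => pvLetter p.1) [] (fun _ p => fun v => v ++ [p])]
    simp [PySem.Dict.keys, PySem.Dict.empty, PySem.Set.update_nil_left]
  set SL := PySem.List.sorted (PySem.Set.ofList (items.map (fun p => pvLetter p.1))) (fun L => L) with hSLdef
  have hpwL : SL.Pairwise (· < ·) := PySem.List.sorted_ofList_pairwise_lt _
  have hndL : SL.Nodup := hpwL.imp (fun h => ne_of_lt h)
  have hmemL : ∀ L, L ∈ SL ↔ ∃ p ∈ items, pvLetter p.1 = L := by
    intro L
    simp only [hSLdef, PySem.List.mem_sorted, PySem.Set.mem_ofList, List.mem_map]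
  have hinj : ∀ a ∈ items, ∀ b ∈ items, a.1 = b.1 → a = b := by
    intro a ha b hb h
    exact List.inj_on_of_nodup_map hnodup ha hb h
  -- inner tuple-sort is the sort on the term
  have hinner : ∀ L : Char,
      PySem.List.sorted2 (items.filter (fun p => pvLetter p.1 == L)) (fun p => p.1) (fun p => p.2)
        = PySem.List.sorted (items.filter (fun p => pvLetter p.1 == L)) (fun p => p.1) := by
    intro L
    apply pv_sorted2_eq_sorted _ _ _ (fun c => lt_irrefl c)
    intro a ha b hb h
    exact hinj a (List.mem_of_mem_filter ha) b (List.mem_of_mem_filter hb) h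
  -- the per-letter sorted groups
  set g' : Char → List (String × List String) :=
    fun L => PySem.List.sorted (items.filter (fun p => pvLetter p.1 == L)) (fun p => p.1) with hg'def
  have hmemg : ∀ L, ∀ p ∈ g' L, pvLetter p.1 = L := by
    intro L p hp
    rw [hg'def, PySem.List.mem_sorted] at hp
    exact beq_iff_eq.mp (List.mem_filter.mp hp).2
  have hmemgitems : ∀ L, ∀ p ∈ g' L, p ∈ items := by
    intro L p hp
    rw [hg'def, PySem.List.mem_sorted] at hp
    exact (List.mem_filter.mp hp).1
  have hgne : ∀ L ∈ SL, g' L ≠ [] := by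
    intro L hL
    rw [hg'def, ne_eq, PySem.List.sorted_eq_nil_iff]
    obtain ⟨p, hp, hpl⟩ := (hmemL L).mp hL
    intro hc
    have : p ∈ items.filter (fun p => pvLetter p.1 == L) := List.mem_filter.mpr ⟨hp, by simp [hpl]⟩
    rw [hc] at this
    exact List.not_mem_nil this
  -- B's single sort splits into the concatenation of A's sorted per-letter groups
  have hsplit : PySem.List.sorted items (fun p => pvLetter p.1 :: p.1.toList) = SL.flatMap g' := by
    rw [pv_sorted_congrLT (i2 := List.instLinearOrder.toLT) (d2 := LinearOrder.toDecidableLT)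
        (fun a b => Iff.rfl)]
    apply PySem.List.sorted_eq_of_perm_of_pairwise_lt
    · -- permutation
      refine (pv_flatMap_perm_congr SL g' (fun L => items.filter (fun p => pvLetter p.1 == L))
          (fun L _ => PySem.List.sorted_perm _ _ _)).trans ?_
      have hcov : ∀ x ∈ items, pvLetter x.1 ∈ SL := fun x hx => (hmemL _).mpr ⟨x, hx, rfl⟩
      exact @pv_flatMap_filter_perm (String × List String) Char
        (@instBEqOfDecidableEq Char instDecidableEqChar) inferInstance
        (fun p => pvLetter p.1) SL items hndL hcov
    · -- strictly increasing keys along the concatenation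
      rw [List.pairwise_flatMap]
      constructor
      · intro L _
        have hle : (g' L).Pairwise (fun a b => a.1 ≤ b.1) := PySem.List.sorted_pairwise _ _
        have hnd2 : ((g' L).map (fun p => p.1)).Nodup := by
          have hperm : ((g' L).map (fun p => p.1)).Perm
              ((items.filter (fun p => pvLetter p.1 == L)).map (fun p => p.1)) :=
            (PySem.List.sorted_perm _ _ _).map _
          refine hperm.nodup_iff.mpr ?_
          exact hnodup.sublist (List.Sublist.map _ List.filter_sublist)
        have hne2 : (g' L).Pairwise (fun a b => a.1 ≠ b.1) := by
          rw [List.Nodup, List.pairwise_map] at hnd2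
          exact hnd2
        refine (hle.and hne2).imp_of_mem ?_
        intro a b ha hb hab
        have h1 : pvLetter a.1 = L := hmemg L a ha
        have h2 : pvLetter b.1 = L := hmemg L b hb
        rw [h1, h2, List.cons_lt_cons_iff]
        exact Or.inr ⟨rfl, String.lt_iff_toList_lt.mp (lt_of_le_of_ne hab.1 hab.2)⟩
      · refine hpwL.imp ?_
        intro L1 L2 h x hx y hy
        rw [hmemg L1 x hx, hmemg L2 y hy, List.cons_lt_cons_iff]
        exact Or.inl h
  -- now compute both sides
  simp only [hgrp, hkeys, hinner]
  rw [← hSLdef, hsplit, pv_foldA SL g' pvHeader]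
  cases hSL0 : SL with
  | nil =>
    simp [PySem.Chars.join_singleton]
  | cons L0 Ls' =>
    have hg0 := hmemg L0
    have hgne' : ∀ L ∈ (L0 :: Ls'), g' L ≠ [] := hSL0 ▸ hgne
    have hpw' : (L0 :: Ls').Pairwise (· < ·) := hSL0 ▸ hpwL
    simp only [List.flatMap_cons, List.foldl_append]
    rw [pv_run_block (g' L0) L0 hg0 (hgne' L0 List.mem_cons_self) none (by simp) [pvHeader]]
    simp only [Option.isSome_none, Bool.false_eq_true]
    rw [pv_run_blocks Ls' g' (fun L hL => hmemg L) (fun L hL => hgne' L (List.mem_cons_of_mem _ hL))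
        L0 (fun L hL => (List.pairwise_cons.mp hpw').1 L hL) (List.pairwise_cons.mp hpw').2]
    simp only [Option.isSome_some, if_pos]
    apply congrArg
    rw [pv_join_nil_eq_flatten]
    simp only [List.flatten_append, List.flatten_cons, List.flatten_nil, List.append_nil,
      List.append_assoc, if_false]
    rw [pv_close_shuffle Ls' g', pv_shift Ls' (fun L => pvH2 L ++ (g' L).flatMap pvLi) pvCloseUl]
    simp [List.flatMap_def]

-- ===== VERDICT (by name: the statement is the Claim_ definition above) =====
theorem format_index_html_py_spec : Claim_equal_format_index_html_py := by
  intro entries _ _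
  unfold Spec_format_index_html_py
  exact pv_main entries
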